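-- pv_equiv track=rewrite | github.com/MinRayDev/Projet-S1 | utils/ShapeUtils.py | gen_losange
-- ===== SOURCE A (Python) =====
-- import math
--
-- def add_space(string: str):
--     string_to_return = ""
--     for char in string:
--         if char != "\n":
--             string_to_return += char + " "
--         else:
--             string_to_return += char
--     return string_to_return
--
-- def gen_losange(size: int) -> str:
--     string_to_return: str = ""
--     offset = 2 if size % 2 == 0 else 1
--
--     for x in range(math.ceil(size / 2)):
--         string_to_return += "0" * (int(size / 2) - (x + offset - 1))
--         string_to_return += "1" * (2 * x + offset)
--         string_to_return += "0" * (int(size / 2) - (x + offset - 1))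
--         string_to_return += "\n"
--
--     for x in range(int(size / 2) + 1 - 2, -1, -1):
--         string_to_return += "0" * (int(size / 2) - (x + offset - 1))
--         string_to_return += "1" * (2 * x + offset)
--         string_to_return += "0" * (int(size / 2) - (x + offset - 1))
--         string_to_return += "\n"
--     return add_space(string_to_return)
-- ===== SOURCE B (Python) =====
-- def gen_losange(size: int) -> str:
--     offset = 1 if size % 2 else 2
--     widths = list(range(offset, size + 1, 2))
--     rev = widths[::-1]
--     profile = widths + rev if size % 2 == 0 else widths + rev[1:]
--     pieces = []
--     for k in profile:
--         pad = "0 " * ((size - k) // 2)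
--         pieces.append(pad + "1 " * k + pad + "\n")
--     return "".join(pieces)
-- ===== Notes on version B (the rewrite author's own statement) =====
-- stated objective: simpler
-- what changed: B computes the list of row widths once (a step-2 range plus its mirrored reverse, dropping the duplicate centre for odd sizes) and renders each already-spaced line directly, replacing A's two index loops over raw rows followed by a whole-string add_space pass.
import Mathlib
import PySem

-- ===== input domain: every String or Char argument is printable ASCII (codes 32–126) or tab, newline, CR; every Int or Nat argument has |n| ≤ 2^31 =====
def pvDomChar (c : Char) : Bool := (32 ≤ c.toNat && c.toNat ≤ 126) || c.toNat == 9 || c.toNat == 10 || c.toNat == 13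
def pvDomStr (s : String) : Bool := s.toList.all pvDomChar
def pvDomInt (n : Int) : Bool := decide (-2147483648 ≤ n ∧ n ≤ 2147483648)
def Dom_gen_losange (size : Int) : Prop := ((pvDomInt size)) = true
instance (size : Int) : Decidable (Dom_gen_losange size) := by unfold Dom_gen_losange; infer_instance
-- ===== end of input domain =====

-- B builds each already-spaced line directly from the list of row widths (range with step 2
-- plus its mirrored reverse) instead of A's two index loops over raw rows followed by an
-- add_space pass over the whole string; objective: simpler. No argument is mutated.

-- ===== PORT A =====

-- int(size / 2): Python truncates toward zero; exact since |size| ≤ 2^31 keeps size/2 an exact float.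
def truncHalf (n : Int) : Int :=
  if 0 ≤ n then PySem.Int.floordiv n 2 else -(PySem.Int.floordiv (-n) 2)

def add_space (string : String) : String :=
  String.ofList (string.toList.foldl
    (fun acc c => if c ≠ '\n' then acc ++ [c, ' '] else acc ++ [c]) [])

def gen_losange (size : Int) : String :=
  let offset : Int := if PySem.Int.mod size 2 = 0 then 2 else 1
  let half : Int := truncHalf size
  -- the two loops have the identical body; "0"*n is pyRepeat ['0'] n
  let row : List Char → Int → List Char := fun acc x =>
    acc ++ PySem.List.pyRepeat ['0'] (half - (x + offset - 1))
        ++ PySem.List.pyRepeat ['1'] (2 * x + offset)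
        ++ PySem.List.pyRepeat ['0'] (half - (x + offset - 1))
        ++ ['\n']
  -- math.ceil(size / 2) = (size + 1) // 2 for an int-valued exact float
  let s1 := (PySem.List.pyRange 0 (PySem.Int.floordiv (size + 1) 2) 1).foldl row []
  let s2 := (PySem.List.pyRange (half + 1 - 2) (-1) (-1)).foldl row s1
  add_space (String.ofList s2)

-- ===== PORT B =====

def gen_losange_alt (size : Int) : String :=
  let offset : Int := if PySem.Int.mod size 2 ≠ 0 then 1 else 2
  let widths := PySem.List.pyRange offset (size + 1) 2
  let rev := widths.reverse     -- widths[::-1] (PySem.List.slice?_none_none_neg_one)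
  let profile := if PySem.Int.mod size 2 = 0 then widths ++ rev else widths ++ rev.drop 1
  let pieces := profile.foldl (fun acc k =>
    let pad := PySem.List.pyRepeat ['0', ' '] (PySem.Int.floordiv (size - k) 2)
    acc ++ [pad ++ PySem.List.pyRepeat ['1', ' '] k ++ pad ++ ['\n']]) ([] : List (List Char))
  String.ofList pieces.flatten   -- "".join(pieces)

-- ===== PRECONDITION & SPEC =====
def Spec_gen_losange (size : Int) (out : String) : Prop := out = gen_losange_alt size
instance (size : Int) (out : String) : Decidable (Spec_gen_losange size out) := by unfold Spec_gen_losange; infer_instance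

-- ===== CLAIM (what is proved, stated in full; the proofs are below) =====
def Claim_equal_gen_losange : Prop := ∀ (size : Int), Dom_gen_losange size → Spec_gen_losange size (gen_losange size)

-- ===== LEMMAS AND PROOFS =====

-- add_space acts characterwise
def gch (c : Char) : List Char := if c ≠ '\n' then [c, ' '] else [c]

theorem add_space_flatMap (l : List Char) :
    add_space (String.ofList l) = String.ofList (l.flatMap gch) := by
  unfold add_space
  have h : (fun (acc : List Char) (c : Char) =>
      if c ≠ '\n' then acc ++ [c, ' '] else acc ++ [c]) =
      fun acc c => acc ++ gch c := by
    funext acc c; unfold gch; split <;> rfl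
  rw [String.toList_ofList, h, PySem.List.foldl_append_eq_flatMap, List.nil_append]

theorem flatMap_flatMap' {α β γ : Type} (l : List α) (f : α → List β) (g : β → List γ) :
    (l.flatMap f).flatMap g = l.flatMap (fun x => (f x).flatMap g) := by
  induction l with
  | nil => rfl
  | cons a t ih => simp [List.flatMap_cons, List.flatMap_append, ih]

theorem flatMap_gch_rep (c : Char) (hc : c ≠ '\n') (n : Int) :
    (PySem.List.pyRepeat [c] n).flatMap gch = PySem.List.pyRepeat [c, ' '] n := by
  simp only [PySem.List.pyRepeat]
  have key : ∀ m : Nat, (List.replicate m c).flatMap gch = (List.replicate m [c, ' ']).flatten := by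
    intro m
    induction m with
    | zero => rfl
    | succ m ih => simp [List.replicate_succ, gch, hc, ih]
  simpa using key n.toNat

-- the spaced row B emits for width k
def bRow (size k : Int) : List Char :=
  PySem.List.pyRepeat ['0', ' '] (PySem.Int.floordiv (size - k) 2)
    ++ PySem.List.pyRepeat ['1', ' '] k
    ++ PySem.List.pyRepeat ['0', ' '] (PySem.Int.floordiv (size - k) 2)
    ++ ['\n']

-- A's raw row, spaced, becomes B's row once the padding counts agree
-- A's raw (unspaced) row for loop index x (right-associated, as flatMap produces it)
def rawRow (half offset x : Int) : List Char :=
  PySem.List.pyRepeat ['0'] (half - (x + offset - 1))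
    ++ (PySem.List.pyRepeat ['1'] (2 * x + offset)
    ++ (PySem.List.pyRepeat ['0'] (half - (x + offset - 1)) ++ ['\n']))

theorem rawRow_spaced (half offset size x : Int)
    (hpad : half - (x + offset - 1) = PySem.Int.floordiv (size - (2 * x + offset)) 2) :
    (rawRow half offset x).flatMap gch = bRow size (2 * x + offset) := by
  simp only [rawRow, List.flatMap_append, bRow, hpad,
    flatMap_gch_rep '0' (by decide), flatMap_gch_rep '1' (by decide)]
  simp [gch, List.append_assoc]

theorem map_phi_range (offs : Int) (n : Nat) :
    (PySem.List.pyRange 0 (n : Int) 1).map (fun x => 2 * x + offs)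
      = (List.range n).map (fun (k : Nat) => offs + 2 * (k : Int)) := by
  rw [PySem.List.pyRange_one]
  simp only [sub_zero, Int.toNat_natCast, List.map_map]
  apply List.map_congr_left
  intro a _
  simp; ring

-- B's pieces-then-join equals a flatMap of bRow over the profile
theorem pieces_flatten (size : Int) (l : List Int) :
    (l.foldl (fun acc k =>
      let pad := PySem.List.pyRepeat ['0', ' '] (PySem.Int.floordiv (size - k) 2)
      acc ++ [pad ++ PySem.List.pyRepeat ['1', ' '] k ++ pad ++ ['\n']])
      ([] : List (List Char))).flatten = l.flatMap (bRow size) := by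
  rw [PySem.List.foldl_append_singleton_eq_map (fun k =>
        PySem.List.pyRepeat ['0', ' '] (PySem.Int.floordiv (size - k) 2)
          ++ PySem.List.pyRepeat ['1', ' '] k
          ++ PySem.List.pyRepeat ['0', ' '] (PySem.Int.floordiv (size - k) 2) ++ ['\n'])]
  simp only [List.nil_append, List.flatMap_def]
  congr 1


theorem A_eq_flat (size : Int) :
    gen_losange size = String.ofList
      (((PySem.List.pyRange 0 (PySem.Int.floordiv (size + 1) 2) 1
          ++ PySem.List.pyRange (truncHalf size + 1 - 2) (-1) (-1)).flatMap
        (rawRow (truncHalf size) (if PySem.Int.mod size 2 = 0 then 2 else 1))).flatMap gch) := by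
  simp only [gen_losange]
  rw [show (fun (acc : List Char) (x : Int) =>
        acc ++ PySem.List.pyRepeat ['0'] (truncHalf size - (x + (if PySem.Int.mod size 2 = 0 then (2:Int) else 1) - 1))
            ++ PySem.List.pyRepeat ['1'] (2 * x + (if PySem.Int.mod size 2 = 0 then (2:Int) else 1))
            ++ PySem.List.pyRepeat ['0'] (truncHalf size - (x + (if PySem.Int.mod size 2 = 0 then (2:Int) else 1) - 1))
            ++ ['\n']) =
      fun acc x => acc ++ rawRow (truncHalf size) (if PySem.Int.mod size 2 = 0 then 2 else 1) x by
    funext acc x; simp [rawRow, List.append_assoc]]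
  rw [PySem.List.foldl_append_eq_flatMap, PySem.List.foldl_append_eq_flatMap,
      List.nil_append, ← List.flatMap_append, add_space_flatMap]

theorem B_eq_flat (size : Int) :
    gen_losange_alt size = String.ofList
      ((if PySem.Int.mod size 2 = 0 then
          PySem.List.pyRange (if PySem.Int.mod size 2 ≠ 0 then 1 else 2) (size + 1) 2
            ++ (PySem.List.pyRange (if PySem.Int.mod size 2 ≠ 0 then 1 else 2) (size + 1) 2).reverse
        else
          PySem.List.pyRange (if PySem.Int.mod size 2 ≠ 0 then 1 else 2) (size + 1) 2
            ++ ((PySem.List.pyRange (if PySem.Int.mod size 2 ≠ 0 then 1 else 2) (size + 1) 2).reverse).drop 1).flatMap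
        (bRow size)) := by
  simp only [gen_losange_alt]
  rw [pieces_flatten]

theorem main_eq (size : Int) : gen_losange size = gen_losange_alt size := by
  rw [A_eq_flat, B_eq_flat]
  have h2 : (0:Int) < 2 := by norm_num
  by_cases hpos : size ≤ 0
  · -- size ≤ 0: all ranges are empty, both sides are the empty string
    have hc : PySem.Int.floordiv (size + 1) 2 ≤ 0 := by
      rw [PySem.Int.floordiv_eq_ediv_of_pos h2]; omega
    have hh : truncHalf size ≤ 0 := by
      unfold truncHalf
      split
      · rw [PySem.Int.floordiv_eq_ediv_of_pos h2]; omega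
      · rw [PySem.Int.floordiv_eq_ediv_of_pos h2]; omega
    have hwid : PySem.List.pyRange (if PySem.Int.mod size 2 ≠ 0 then (1:Int) else 2) (size + 1) 2 = [] := by
      rw [PySem.List.pyRange_of_pos _ _ h2]
      rw [if_neg (show ¬((if PySem.Int.mod size 2 ≠ 0 then (1:Int) else 2) < size + 1) from by
        split <;> omega)]
      simp
    rw [PySem.List.pyRange_one_eq_nil hc, PySem.List.pyRange_neg_one_eq_nil (by omega), hwid]
    split <;> rfl
  · rw [not_le] at hpos
    have hmod := PySem.Int.mod_eq_emod_of_pos (a := size) h2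
    have hα : truncHalf size = size / 2 := by
      unfold truncHalf
      rw [if_pos (by omega), PySem.Int.floordiv_eq_ediv_of_pos h2]
    rcases Int.emod_two_eq size with hpar | hpar
    · -- even size, offset = 2
      have hm0 : PySem.Int.mod size 2 = 0 := by rw [hmod, hpar]
      simp only [hm0, reduceIte, ne_eq, not_true_eq_false, if_false]
      set n : Nat := (size / 2).toNat with hn
      have hn' : (size / 2 : Int) = (n : Int) := by omega
      congr 1
      rw [flatMap_flatMap']
      rw [show (fun x => (rawRow (truncHalf size) 2 x).flatMap gch) = fun x => bRow size (2 * x + 2) from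
        funext fun x => rawRow_spaced _ _ size x (by
          rw [hα, PySem.Int.floordiv_eq_ediv_of_pos h2]; omega)]
      rw [← List.flatMap_map (fun x => 2 * x + 2) (bRow size)]
      congr 1
      rw [List.map_append]
      have hc : PySem.Int.floordiv (size + 1) 2 = (n : Int) := by
        rw [PySem.Int.floordiv_eq_ediv_of_pos h2]; omega
      have hw : PySem.List.pyRange 2 (size + 1) 2
          = (List.range n).map (fun (k : Nat) => 2 + 2 * (k : Int)) := by
        rw [PySem.List.pyRange_of_pos _ _ h2, if_pos (by omega)]
        congr 2
        omega
      have hfst : (PySem.List.pyRange 0 (PySem.Int.floordiv (size + 1) 2) 1).map (fun x => 2 * x + 2)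
          = (List.range n).map (fun (k : Nat) => 2 + 2 * (k : Int)) := by
        rw [hc, map_phi_range]
      have hsnd : (PySem.List.pyRange (truncHalf size + 1 - 2) (-1) (-1)).map (fun x => 2 * x + 2)
          = ((List.range n).map (fun (k : Nat) => 2 + 2 * (k : Int))).reverse := by
        rw [PySem.List.pyRange_neg_one_eq_reverse]
        rw [show (-1 : Int) + 1 = 0 by norm_num, show truncHalf size + 1 - 2 + 1 = truncHalf size by ring]
        rw [List.map_reverse, hα, hn', map_phi_range]
      rw [hfst, hsnd, hw]
    · -- odd size, offset = 1
      have hm1 : PySem.Int.mod size 2 = 1 := by rw [hmod, hpar]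
      simp only [hm1, one_ne_zero, ne_eq, not_false_eq_true, if_true, if_false]
      set n : Nat := ((size + 1) / 2).toNat with hn
      set m : Nat := (size / 2).toNat with hm
      have hnm : n = m + 1 := by omega
      have hm' : (size / 2 : Int) = (m : Int) := by omega
      congr 1
      rw [flatMap_flatMap']
      rw [show (fun x => (rawRow (truncHalf size) 1 x).flatMap gch) = fun x => bRow size (2 * x + 1) from
        funext fun x => rawRow_spaced _ _ size x (by
          rw [hα, PySem.Int.floordiv_eq_ediv_of_pos h2]; omega)]
      rw [← List.flatMap_map (fun x => 2 * x + 1) (bRow size)]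
      congr 1
      rw [List.map_append]
      have hc : PySem.Int.floordiv (size + 1) 2 = (n : Int) := by
        rw [PySem.Int.floordiv_eq_ediv_of_pos h2]; omega
      have hw : PySem.List.pyRange 1 (size + 1) 2
          = (List.range n).map (fun (k : Nat) => 1 + 2 * (k : Int)) := by
        rw [PySem.List.pyRange_of_pos _ _ h2, if_pos (by omega)]
        congr 2
        omega
      have hfst : (PySem.List.pyRange 0 (PySem.Int.floordiv (size + 1) 2) 1).map (fun x => 2 * x + 1)
          = (List.range n).map (fun (k : Nat) => 1 + 2 * (k : Int)) := by
        rw [hc, map_phi_range]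
      have hsnd : (PySem.List.pyRange (truncHalf size + 1 - 2) (-1) (-1)).map (fun x => 2 * x + 1)
          = ((List.range m).map (fun (k : Nat) => 1 + 2 * (k : Int))).reverse := by
        rw [PySem.List.pyRange_neg_one_eq_reverse]
        rw [show (-1 : Int) + 1 = 0 by norm_num, show truncHalf size + 1 - 2 + 1 = truncHalf size by ring]
        rw [List.map_reverse, hα, hm', map_phi_range]
      have hdrop : (((List.range n).map (fun (k : Nat) => 1 + 2 * (k : Int))).reverse).drop 1
          = ((List.range m).map (fun (k : Nat) => 1 + 2 * (k : Int))).reverse := by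
        rw [List.drop_reverse]
        congr 1
        rw [List.length_map, List.length_range, ← List.map_take, List.take_range]
        congr 2
        omega
      rw [hfst, hsnd, hw, hdrop]

-- ===== VERDICT (by name: the statement is the Claim_ definition above) =====
theorem gen_losange_spec : Claim_equal_gen_losange := by
  intro size _
  unfold Spec_gen_losange
  exact main_eq size
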